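-- pv_equiv track=rewrite | github.com/bica-tools/reticulate | reticulate/place_invariants.py | _transpose_to_dense
-- ===== SOURCE A (Python) =====
-- def _transpose_to_dense(
--     matrix: dict[int, dict[int, int]],
--     row_ids: list[int],
--     col_ids: list[int],
-- ) -> list[list[int]]:
--     """Convert C[p,t] (sparse) to C^T as dense list-of-lists.
--
--     Result has len(col_ids) rows and len(row_ids) columns,
--     i.e. C^T[t][p].
--     """
--     rows: list[list[int]] = []
--     for t in col_ids:
--         row = []
--         for p in row_ids:
--             row.append(matrix.get(p, {}).get(t, 0))
--         rows.append(row)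
--     return rows
-- ===== SOURCE B (Python) =====
-- def _transpose_to_dense(
--     matrix: dict[int, dict[int, int]],
--     row_ids: list[int],
--     col_ids: list[int],
-- ) -> list[list[int]]:
--     """Transpose the sparse matrix first (C[p,t] -> T[t,p]), then densify."""
--     transposed: dict[int, dict[int, int]] = {}
--     for p, inner in matrix.items():
--         for t, v in inner.items():
--             transposed.setdefault(t, {})[p] = v
--     return [[transposed.get(t, {}).get(p, 0) for p in row_ids] for t in col_ids]
-- ===== Notes on version B (the rewrite author's own statement) =====
-- stated objective: alternative
-- what changed: B first transposes the sparse matrix itself (one pass over matrix.items() building t->p->v with setdefault), then fills the dense result by lookups in the transposed dict, instead of A's direct nested get on the untransposed matrix for every dense cell.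
import Mathlib
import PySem

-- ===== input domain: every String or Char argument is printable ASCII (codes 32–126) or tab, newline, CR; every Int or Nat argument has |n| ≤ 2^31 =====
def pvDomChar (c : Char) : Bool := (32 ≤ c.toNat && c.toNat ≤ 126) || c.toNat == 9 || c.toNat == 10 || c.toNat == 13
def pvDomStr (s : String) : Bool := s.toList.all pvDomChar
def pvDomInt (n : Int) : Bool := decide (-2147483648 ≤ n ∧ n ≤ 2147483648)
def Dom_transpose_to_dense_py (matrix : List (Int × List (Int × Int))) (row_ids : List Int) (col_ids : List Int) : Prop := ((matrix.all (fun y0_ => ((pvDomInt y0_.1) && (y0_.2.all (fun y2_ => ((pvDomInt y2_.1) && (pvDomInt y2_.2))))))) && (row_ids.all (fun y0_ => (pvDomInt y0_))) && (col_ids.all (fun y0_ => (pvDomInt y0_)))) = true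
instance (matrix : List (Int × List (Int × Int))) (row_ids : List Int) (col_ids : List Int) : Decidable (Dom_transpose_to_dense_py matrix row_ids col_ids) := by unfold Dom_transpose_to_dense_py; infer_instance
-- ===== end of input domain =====

-- B transposes the sparse matrix once (t -> p -> v) and densifies from that, instead of A's
-- per-cell nested lookups on the untransposed matrix; same cost, different data structure.

-- ===== PORT A =====
-- literal port of A: for t in col_ids: for p in row_ids: row.append(matrix.get(p, {}).get(t, 0))
def transpose_to_dense_py (matrix : List (Int × List (Int × Int))) (row_ids : List Int) (col_ids : List Int) : List (List Int) :=
  col_ids.foldl (fun rows t =>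
    rows ++ [row_ids.foldl (fun row p =>
      row ++ [(PySem.Dict.mk ((PySem.Dict.mk matrix).getD p [])).getD t 0]) []]) []

-- ===== PORT B =====
-- Source B's first loop: transposed.setdefault(t, {})[p] = v, i.e. modify t {} (insert p v)
def pvTransposed (matrix : List (Int × List (Int × Int))) : PySem.Dict Int (PySem.Dict Int Int) :=
  matrix.foldl (fun d pr =>
    pr.2.foldl (fun d' tv => d'.modify tv.1 PySem.Dict.empty (fun m => m.insert pr.1 tv.2)) d)
    PySem.Dict.empty

def transpose_to_dense_py_alt (matrix : List (Int × List (Int × Int))) (row_ids : List Int) (col_ids : List Int) : List (List Int) :=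
  let transposed := pvTransposed matrix
  col_ids.map (fun t => row_ids.map (fun p => (transposed.getD t PySem.Dict.empty).getD p 0))

-- ===== PRECONDITION & SPEC =====
-- Pre_ excludes association lists with duplicate outer or inner keys: they do not represent the
-- Python dict argument (dict construction collapses duplicates last-wins, while first-match
-- association-list lookup would pick the first), so neither value is the dict's.
def Pre_transpose_to_dense_py (matrix : List (Int × List (Int × Int))) (row_ids : List Int) (col_ids : List Int) : Prop :=
  (matrix.map Prod.fst).Nodup ∧ ∀ pr ∈ matrix, (pr.2.map Prod.fst).Nodup
instance (matrix : List (Int × List (Int × Int))) (row_ids : List Int) (col_ids : List Int) : Decidable (Pre_transpose_to_dense_py matrix row_ids col_ids) := by unfold Pre_transpose_to_dense_py; infer_instance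

def pvWitness_transpose_to_dense_py : (List (Int × List (Int × Int))) × List Int × List Int :=
  ([(1, [(2, 3)]), (4, [(2, 5)])], [1, 4, 1], [2, 7])

def Spec_transpose_to_dense_py (matrix : List (Int × List (Int × Int))) (row_ids : List Int) (col_ids : List Int) (out : List (List Int)) : Prop := out = transpose_to_dense_py_alt matrix row_ids col_ids
instance (matrix : List (Int × List (Int × Int))) (row_ids : List Int) (col_ids : List Int) (out : List (List Int)) : Decidable (Spec_transpose_to_dense_py matrix row_ids col_ids out) := by unfold Spec_transpose_to_dense_py; infer_instance

-- ===== CLAIM (what is proved, stated in full; the proofs are below) =====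
def Claim_equal_transpose_to_dense_py : Prop := ∀ (matrix : List (Int × List (Int × Int))) (row_ids : List Int) (col_ids : List Int), Dom_transpose_to_dense_py matrix row_ids col_ids → Pre_transpose_to_dense_py matrix row_ids col_ids → Spec_transpose_to_dense_py matrix row_ids col_ids (transpose_to_dense_py matrix row_ids col_ids)

-- ===== LEMMAS AND PROOFS =====

-- the inner-loop step of pvTransposed, for one matrix row (q, inner)
-- step over inner does not touch column-dict entries of any p ≠ q
lemma pvStep_getD_of_ne (inner : List (Int × Int)) (q t p : Int) (hpq : p ≠ q) :
    ∀ d : PySem.Dict Int (PySem.Dict Int Int),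
      ((inner.foldl (fun d' tv => d'.modify tv.1 PySem.Dict.empty (fun m => m.insert q tv.2)) d).getD t PySem.Dict.empty).getD p 0
        = (d.getD t PySem.Dict.empty).getD p 0 := by
  induction inner with
  | nil => intro d; rfl
  | cons tv rest ih =>
    intro d
    rw [List.foldl_cons, ih]
    rw [PySem.Dict.getD_modify]
    split_ifs with h
    · rw [PySem.Dict.getD_insert]
      simp [hpq, h]
    · rfl

-- step over inner rewrites exactly the row q of the transposed dict to inner's (first-match) values
lemma pvStep_getD_self (inner : List (Int × Int)) (q t : Int) (hn : (inner.map Prod.fst).Nodup) :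
    ∀ d : PySem.Dict Int (PySem.Dict Int Int),
      ((inner.foldl (fun d' tv => d'.modify tv.1 PySem.Dict.empty (fun m => m.insert q tv.2)) d).getD t PySem.Dict.empty).getD q 0
        = ((PySem.Dict.mk inner).get? t).getD ((d.getD t PySem.Dict.empty).getD q 0) := by
  induction inner with
  | nil => intro d; simp [PySem.Dict.get?]
  | cons tv rest ih =>
    intro d
    simp only [List.map_cons, List.nodup_cons] at hn
    rw [List.foldl_cons, ih hn.2, PySem.Dict.get?_mk_cons]
    by_cases ht : tv.1 = t
    · subst ht
      simp only [beq_self_eq_true, if_pos]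
      have hrest : (PySem.Dict.mk rest).get? tv.1 = none := by
        rw [PySem.Dict.get?_eq_none_iff_not_mem_keys]
        simpa [PySem.Dict.keys] using hn.1
      rw [hrest, PySem.Dict.getD_modify_self, PySem.Dict.getD_insert]
      simp
    · have hb : (tv.1 == t) = false := by simp [ht]
      rw [hb]
      simp only [Bool.false_eq_true, if_false]
      rw [PySem.Dict.getD_modify_of_ne d PySem.Dict.empty _ (fun h => ht h.symm)]

-- full build: cell (t, p) of the transposed dict is matrix's first-match value at (p, t)
lemma pvTransposed_fold (matrix : List (Int × List (Int × Int))) (t p : Int)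
    (hm : (matrix.map Prod.fst).Nodup) (hi : ∀ pr ∈ matrix, (pr.2.map Prod.fst).Nodup) :
    ∀ d : PySem.Dict Int (PySem.Dict Int Int),
      (((matrix.foldl (fun d pr =>
            pr.2.foldl (fun d' tv => d'.modify tv.1 PySem.Dict.empty (fun m => m.insert pr.1 tv.2)) d)
          d).getD t PySem.Dict.empty).getD p 0)
        = (((PySem.Dict.mk matrix).get? p).map
            (fun inner => ((PySem.Dict.mk inner).get? t).getD ((d.getD t PySem.Dict.empty).getD p 0))).getD
            ((d.getD t PySem.Dict.empty).getD p 0) := by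
  induction matrix with
  | nil => intro d; simp [PySem.Dict.get?]
  | cons pr rest ih =>
    intro d
    simp only [List.map_cons, List.nodup_cons] at hm
    rw [List.foldl_cons, ih hm.2 (fun x hx => hi x (List.mem_cons_of_mem _ hx)), PySem.Dict.get?_mk_cons]
    by_cases hp : pr.1 = p
    · subst hp
      have hrest : (PySem.Dict.mk rest).get? pr.1 = none := by
        rw [PySem.Dict.get?_eq_none_iff_not_mem_keys]
        simpa [PySem.Dict.keys] using hm.1
      rw [hrest]
      simp only [beq_self_eq_true, if_pos, Option.map_none, Option.getD_none, Option.map_some,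
        Option.getD_some]
      exact pvStep_getD_self pr.2 pr.1 t (hi pr (List.mem_cons_self)) d
    · have : (pr.1 == p) = false := by simp [hp]
      rw [this]
      simp only [Bool.false_eq_true, if_neg, not_false_iff]
      rw [pvStep_getD_of_ne pr.2 pr.1 t p (fun h => hp h.symm) d]

-- cell-level equality of the two ports' lookups
lemma pvCell_eq (matrix : List (Int × List (Int × Int))) (t p : Int)
    (hm : (matrix.map Prod.fst).Nodup) (hi : ∀ pr ∈ matrix, (pr.2.map Prod.fst).Nodup) :
    ((pvTransposed matrix).getD t PySem.Dict.empty).getD p 0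
      = (PySem.Dict.mk ((PySem.Dict.mk matrix).getD p [])).getD t 0 := by
  unfold pvTransposed
  rw [pvTransposed_fold matrix t p hm hi PySem.Dict.empty]
  have hz : ((PySem.Dict.empty.getD t PySem.Dict.empty).getD p 0 : Int) = 0 := by
    simp [PySem.Dict.getD_empty]
  rw [hz, PySem.Dict.getD_eq_get?_getD]
  cases h : (PySem.Dict.mk matrix).get? p with
  | none =>
    rw [PySem.Dict.getD_eq_get?_getD, h]
    simp [PySem.Dict.get?]
  | some inner => simp [h, PySem.Dict.getD_eq_get?_getD]

-- ===== VERDICT (by name: the statement is the Claim_ definition above) =====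
theorem transpose_to_dense_py_spec : Claim_equal_transpose_to_dense_py := by
  intro matrix row_ids col_ids _ hpre
  unfold Spec_transpose_to_dense_py transpose_to_dense_py transpose_to_dense_py_alt
  rw [PySem.List.foldl_append_singleton_eq_map]
  refine List.map_congr_left (fun t _ => ?_)
  rw [PySem.List.foldl_append_singleton_eq_map]
  refine List.map_congr_left (fun p _ => ?_)
  exact (pvCell_eq matrix t p hpre.1 hpre.2).symm
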